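-- pv_equiv track=rewrite | github.com/GitOffice/cs221-project | scripts/search_utils.py | phoneme_adjust
-- ===== SOURCE A (Python) =====
-- def phoneme_adjust(eng):
--     eng = eng.lower()
--     eng = eng.replace('ju', 'zhu')
--     eng = eng.replace('ew', 'iu')
--     eng = eng.replace('r', 'l')
--
--     # get rid of repeating letters
--     for i in range(len(eng)):
--         if i < len(eng) - 1 and eng[i] == eng[i + 1]:
--             eng = eng[0:i] + eng[i + 1:]
--
--     eng = eng.replace('ia', 'iya')
--     eng = eng.replace('ce', 'si')
--     eng = eng.replace('ci', 'si')
--     eng = eng.replace('ch', 'q')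
--     eng = eng.replace('c', 'k')
--     eng = eng.replace('ck', 'k')
--     eng = eng.replace('ph', 'f')
--     if eng.count('y') > 1:
--         eng = "".join(reversed("".join(reversed(eng)).replace('y', 'i', 1))) # y is i if at end of string
--     if eng != "" and eng[-1] == 'y':
--         eng = eng[0:len(eng) - 1] + 'i'
--     eng = eng.replace('th', 'x')
--     eng = eng.replace('v', 'w')
--
--     # get rid of repeating letters once more
--     for i in range(len(eng)):
--         if i < len(eng) - 1 and eng[i] == eng[i + 1]:
--             eng = eng[0:i] + eng[i + 1:]
--
--     return eng
-- ===== SOURCE B (Python) =====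
-- # table-driven rewriting: each stage is a rule list folded over the string,
-- # dedup is one linear forward pass, the two y-steps are fused via rpartition
-- _STAGE1 = [('ju', 'zhu'), ('ew', 'iu'), ('r', 'l')]
-- _STAGE2 = [('ia', 'iya'), ('ce', 'si'), ('ci', 'si'), ('ch', 'q'),
--            ('c', 'k'), ('ck', 'k'), ('ph', 'f')]
-- _STAGE3 = [('th', 'x'), ('v', 'w')]
--
--
-- def _rewrite(s, rules):
--     for pat, rep in rules:
--         s = s.replace(pat, rep)
--     return s
--
--
-- def _collapse(s):
--     # one forward pass replicating the shifting-index deletion of A's loop: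
--     # emit the char, skip its immediate duplicate partner
--     out = []
--     i = 0
--     n = len(s)
--     while i < n:
--         out.append(s[i])
--         i += 2 if (i + 1 < n and s[i] == s[i + 1]) else 1
--     return ''.join(out)
--
--
-- def phoneme_adjust(eng):
--     s = _rewrite(eng.lower(), _STAGE1)
--     s = _collapse(s)
--     s = _rewrite(s, _STAGE2)
--     # A replaces an inner y (when several) or a trailing y in two separate
--     # steps; together they replace the LAST y by i exactly when there is
--     # more than one y or the string ends in y
--     if s.count('y') > 1 or s.endswith('y'):
--         head, _, tail = s.rpartition('y')
--         s = head + 'i' + tail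
--     s = _rewrite(s, _STAGE3)
--     return _collapse(s)
-- ===== Notes on version B (the rewrite author's own statement) =====
-- stated objective: faster
-- what changed: B is table-driven (each stage is a rule list folded over the string instead of A's hand-written chain of replace calls), replaces A's two quadratic shifting-index deletion loops by a single linear forward pass each, and fuses A's double-reverse plus trailing-y special case into one replace-the-last-y step via rpartition.
import Mathlib
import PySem

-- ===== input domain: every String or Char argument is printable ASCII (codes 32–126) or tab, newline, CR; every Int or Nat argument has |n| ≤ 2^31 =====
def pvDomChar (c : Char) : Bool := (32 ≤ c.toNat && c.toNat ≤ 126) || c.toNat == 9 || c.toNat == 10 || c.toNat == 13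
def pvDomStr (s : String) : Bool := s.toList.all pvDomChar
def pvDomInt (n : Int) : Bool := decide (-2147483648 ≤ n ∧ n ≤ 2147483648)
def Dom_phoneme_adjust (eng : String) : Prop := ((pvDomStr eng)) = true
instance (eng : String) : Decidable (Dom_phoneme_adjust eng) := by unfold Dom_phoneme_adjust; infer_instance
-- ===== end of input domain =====

-- B is table-driven (rule lists folded over the string instead of A's hand-written replace chain),
-- replaces A's two quadratic shifting-index dedup loops by one linear forward pass each, and fuses
-- A's double-reverse / trailing-y pair into one replace-the-last-y step (rpartition); same return value.

-- ===== PORT A =====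
-- one iteration of A's `for i in range(len(eng)): if i < len(eng)-1 and eng[i] == eng[i+1]: eng = eng[0:i] + eng[i+1:]`
def pvStepA (s : List Char) (i : Nat) : List Char :=
  if i < s.length - 1 ∧ s[i]? = s[i + 1]? then s.take i ++ s.drop (i + 1) else s

-- hand port of `.replace('y', 'i', 1)` (count-limited replace, single-char pattern): exact
def pvReplFirstY : List Char → List Char
  | [] => []
  | c :: t => if c = 'y' then 'i' :: t else c :: pvReplFirstY t

def pvCoreA (s0 : List Char) : List Char :=
  let s := PySem.Chars.lower s0
  let s := PySem.Chars.replace s ['j','u'] ['z','h','u']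
  let s := PySem.Chars.replace s ['e','w'] ['i','u']
  let s := PySem.Chars.replace s ['r'] ['l']
  let s := (List.range s.length).foldl pvStepA s
  let s := PySem.Chars.replace s ['i','a'] ['i','y','a']
  let s := PySem.Chars.replace s ['c','e'] ['s','i']
  let s := PySem.Chars.replace s ['c','i'] ['s','i']
  let s := PySem.Chars.replace s ['c','h'] ['q']
  let s := PySem.Chars.replace s ['c'] ['k']
  let s := PySem.Chars.replace s ['c','k'] ['k']
  let s := PySem.Chars.replace s ['p','h'] ['f']
  let s := if PySem.Chars.count s ['y'] > 1 then (pvReplFirstY s.reverse).reverse else s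
  let s := if s ≠ [] ∧ PySem.List.pyGet? s (-1) = some 'y' then s.take (s.length - 1) ++ ['i'] else s
  let s := PySem.Chars.replace s ['t','h'] ['x']
  let s := PySem.Chars.replace s ['v'] ['w']
  (List.range s.length).foldl pvStepA s

def phoneme_adjust (eng : String) : String := String.ofList (pvCoreA eng.toList)

-- ===== PORT B =====
-- Source B's rule tables _STAGE1/_STAGE2/_STAGE3
def pvStage1 : List (List Char × List Char) :=
  [(['j','u'], ['z','h','u']), (['e','w'], ['i','u']), (['r'], ['l'])]
def pvStage2 : List (List Char × List Char) :=
  [(['i','a'], ['i','y','a']), (['c','e'], ['s','i']), (['c','i'], ['s','i']),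
   (['c','h'], ['q']), (['c'], ['k']), (['c','k'], ['k']), (['p','h'], ['f'])]
def pvStage3 : List (List Char × List Char) :=
  [(['t','h'], ['x']), (['v'], ['w'])]

-- Source B's `_rewrite`: fold the rule list over the string
def pvRewrite (s : List Char) (rules : List (List Char × List Char)) : List Char :=
  rules.foldl (fun t r => PySem.Chars.replace t r.1 r.2) s

-- Source B's `_collapse`: single forward pass, emit s[i] and skip the duplicate partner
def pvCollapse : List Char → List Char
  | [] => []
  | [c] => [c]
  | a :: b :: t => if a = b then a :: pvCollapse t else a :: pvCollapse (b :: t)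

-- hand port of `eng.rpartition('y')` (head and tail around the LAST 'y'; ("", s) when absent): exact
def pvRPartY : List Char → List Char × List Char
  | [] => ([], [])
  | c :: t =>
    if 'y' ∈ t then (c :: (pvRPartY t).1, (pvRPartY t).2)
    else if c = 'y' then ([], t)
    else ([], c :: t)

def pvCoreB (s0 : List Char) : List Char :=
  let s := pvRewrite (PySem.Chars.lower s0) pvStage1
  let s := pvCollapse s
  let s := pvRewrite s pvStage2
  let s := if PySem.Chars.count s ['y'] > 1 ∨ PySem.Chars.endswith s ['y'] = true then
      (pvRPartY s).1 ++ 'i' :: (pvRPartY s).2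
    else s
  let s := pvRewrite s pvStage3
  pvCollapse s

def phoneme_adjust_alt (eng : String) : String := String.ofList (pvCoreB eng.toList)

-- ===== PRECONDITION & SPEC =====
def Spec_phoneme_adjust (eng : String) (out : String) : Prop := out = phoneme_adjust_alt eng
instance (eng : String) (out : String) : Decidable (Spec_phoneme_adjust eng out) := by unfold Spec_phoneme_adjust; infer_instance

-- ===== CLAIM (what is proved, stated in full; the proofs are below) =====
def Claim_equal_phoneme_adjust : Prop := ∀ (eng : String), Dom_phoneme_adjust eng → Spec_phoneme_adjust eng (phoneme_adjust eng)

-- ===== LEMMAS AND PROOFS =====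

theorem pvStepA_frozen (s : List Char) (m start : Nat) (h : s.length - 1 ≤ start) :
    (List.range' start m).foldl pvStepA s = s := by
  induction m generalizing start with
  | zero => rfl
  | succ m ih =>
    rw [List.range'_succ, List.foldl_cons]
    have hs : pvStepA s start = s := by
      unfold pvStepA
      rw [if_neg]
      rintro ⟨h1, -⟩; omega
    rw [hs]; exact ih (start + 1) (by omega)

theorem pvLoop_eq_aux (n : Nat) (p q : List Char) (hq : q.length ≤ n) :
    (List.range' p.length n).foldl pvStepA (p ++ q) = p ++ pvCollapse q := by
  induction n generalizing p q with
  | zero =>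
    interval_cases hl : q.length
    · simp at hl; subst hl; rfl
  | succ n ih =>
    rw [List.range'_succ, List.foldl_cons]
    match q with
    | [] =>
      have hs : pvStepA (p ++ []) p.length = p ++ [] := by
        unfold pvStepA; rw [if_neg]; rintro ⟨h1, -⟩; simp at h1; omega
      rw [hs, pvStepA_frozen _ _ _ (by simp; omega)]
      rfl
    | [a] =>
      have hs : pvStepA (p ++ [a]) p.length = p ++ [a] := by
        unfold pvStepA; rw [if_neg]; rintro ⟨h1, -⟩; simp at h1
      rw [hs, pvStepA_frozen _ _ _ (by simp)]
      rfl
    | a :: b :: t =>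
      by_cases hab : a = b
      · have hs : pvStepA (p ++ a :: b :: t) p.length = (p ++ [b]) ++ t := by
          unfold pvStepA
          rw [if_pos (⟨by simp, by simp [hab]⟩ : _ ∧ _)]
          rw [List.take_left]
          have hdrop := List.drop_length_add_append (l₁ := p) (l₂ := a :: b :: t) 1
          rw [hdrop]
          simp
        rw [hs]
        have h2 := ih (p ++ [b]) t (by simp at hq ⊢; omega)
        simp only [List.length_append, List.length_cons, List.length_nil] at h2 ⊢
        rw [Nat.zero_add] at h2
        rw [h2, show pvCollapse (a :: b :: t) = a :: pvCollapse t by simp [pvCollapse, hab], hab]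
        simp
      · have hs : pvStepA (p ++ a :: b :: t) p.length = (p ++ [a]) ++ b :: t := by
          unfold pvStepA
          rw [if_neg]
          · simp
          · rintro ⟨-, h2⟩
            simp at h2
            exact hab h2
        rw [hs]
        have h2 := ih (p ++ [a]) (b :: t) (by simp at hq ⊢; omega)
        simp only [List.length_append, List.length_cons, List.length_nil] at h2 ⊢
        rw [Nat.zero_add] at h2
        rw [h2, show pvCollapse (a :: b :: t) = a :: pvCollapse (b :: t) by simp [pvCollapse, hab]]
        simp

theorem pvLoop_eq (s : List Char) :
    (List.range s.length).foldl pvStepA s = pvCollapse s := by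
  have := pvLoop_eq_aux s.length [] s (Nat.le_refl _)
  simpa [List.range_eq_range'] using this

theorem pvCountY_go (n : Nat) (s : List Char) (acc : Nat) (h : s.length ≤ n) :
    PySem.Chars.count.go ['y'] n s acc = acc + s.count 'y' := by
  induction n generalizing s acc with
  | zero =>
    match s with
    | [] => simp [PySem.Chars.count.go]
    | c :: t => simp at h
  | succ n ih =>
    match s with
    | [] => simp [PySem.Chars.count.go]
    | c :: t =>
      rw [PySem.Chars.count.go]
      by_cases hc : c = 'y'
      · rw [if_pos (by simp [hc, List.isPrefixOf])]
        simp only [List.length_cons] at h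
        simp only [List.length_singleton, List.drop_succ_cons, List.drop_zero]
        rw [ih t (acc + 1) (by omega)]
        simp [hc]
        omega
      · rw [if_neg (by simp [List.isPrefixOf]; exact fun hh => hc hh.symm)]
        simp only [List.length_cons] at h
        rw [ih t acc (by omega)]
        simp [hc]

theorem pvCountY (s : List Char) : PySem.Chars.count s ['y'] = s.count 'y' := by
  rw [PySem.Chars.count, if_neg (by simp)]
  simpa using pvCountY_go s.length s 0 (Nat.le_refl _)

theorem pvReplFirstY_append_of_mem (u v : List Char) (h : 'y' ∈ u) :
    pvReplFirstY (u ++ v) = pvReplFirstY u ++ v := by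
  induction u with
  | nil => simp at h
  | cons c t ih =>
    by_cases hc : c = 'y'
    · simp [pvReplFirstY, hc]
    · have ht : 'y' ∈ t := by simpa [hc, eq_comm] using h
      simp [pvReplFirstY, hc, ih ht]

theorem pvReplFirstY_append_of_not_mem (u v : List Char) (h : 'y' ∉ u) :
    pvReplFirstY (u ++ v) = u ++ pvReplFirstY v := by
  induction u with
  | nil => simp
  | cons c t ih =>
    have hc : c ≠ 'y' := by rintro rfl; exact h (by simp)
    have ht : 'y' ∉ t := fun hh => h (by simp [hh])
    simp [pvReplFirstY, hc, ih ht]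

theorem pvRPartY_spec (s : List Char) (h : 'y' ∈ s) :
    s = (pvRPartY s).1 ++ 'y' :: (pvRPartY s).2 ∧ 'y' ∉ (pvRPartY s).2 := by
  induction s with
  | nil => simp at h
  | cons c t ih =>
    by_cases ht : 'y' ∈ t
    · obtain ⟨h1, h2⟩ := ih ht
      simp [pvRPartY, ht]
      exact ⟨by conv_lhs => rw [h1], h2⟩
    · have hc : c = 'y' := by
        rcases List.mem_cons.mp h with h' | h'
        · exact h'.symm
        · exact absurd h' ht
      simp [pvRPartY, ht, hc]

theorem pvRevRepl (s : List Char) (h : 'y' ∈ s) :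
    (pvReplFirstY s.reverse).reverse = (pvRPartY s).1 ++ 'i' :: (pvRPartY s).2 := by
  induction s with
  | nil => simp at h
  | cons c t ih =>
    by_cases ht : 'y' ∈ t
    · rw [show (c :: t).reverse = t.reverse ++ [c] from by simp]
      rw [pvReplFirstY_append_of_mem _ _ (by simpa using ht),
          List.reverse_append, ih ht]
      simp [pvRPartY, ht]
    · have hc : c = 'y' := by
        rcases List.mem_cons.mp h with h' | h'
        · exact h'.symm
        · exact absurd h' ht
      rw [show (c :: t).reverse = t.reverse ++ [c] from by simp]
      rw [pvReplFirstY_append_of_not_mem _ _ (by simpa using ht)]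
      simp [pvRPartY, ht, hc, pvReplFirstY]

theorem pvGetNegOne (s : List Char) (h : s ≠ []) : PySem.List.pyGet? s (-1) = s.getLast? := by
  simp [PySem.List.pyGet?, PySem.List.pyIdx?]
  rw [if_pos (by cases s with | nil => exact absurd rfl h | cons a t => simp)]
  simp [List.getLast?_eq_getElem?]

theorem pvSuffixSingleton (s : List Char) (c : Char) : [c] <:+ s ↔ s.getLast? = some c := by
  constructor
  · rintro ⟨u, rfl⟩
    simp
  · intro h
    rcases List.getLast?_eq_some_iff.mp h with ⟨u, rfl⟩
    exact ⟨u, rfl⟩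

theorem pvLastNotY (h t : List Char) (hy : 'y' ∉ t) :
    (h ++ 'i' :: t).getLast? ≠ some 'y' := by
  rw [List.getLast?_append_of_ne_nil _ (by simp : ('i' :: t) ≠ [])]
  match t with
  | [] => simp
  | a :: t' =>
    intro hc
    rw [List.getLast?_cons_cons] at hc
    exact hy (List.mem_of_getLast? hc)

theorem pvYBlock (s : List Char) :
    (let s1 := if PySem.Chars.count s ['y'] > 1 then (pvReplFirstY s.reverse).reverse else s;
     if s1 ≠ [] ∧ PySem.List.pyGet? s1 (-1) = some 'y' then s1.take (s1.length - 1) ++ ['i'] else s1)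
    = if PySem.Chars.count s ['y'] > 1 ∨ PySem.Chars.endswith s ['y'] = true then
        (pvRPartY s).1 ++ 'i' :: (pvRPartY s).2
      else s := by
  rw [pvCountY]
  by_cases h1 : s.count 'y' > 1
  · have hmem : 'y' ∈ s := List.count_pos_iff.mp (by omega)
    obtain ⟨hsp, hnt⟩ := pvRPartY_spec s hmem
    simp only [h1, if_pos, true_or]
    rw [pvRevRepl s hmem, if_neg]
    rintro ⟨-, hlast⟩
    rw [pvGetNegOne _ (by simp)] at hlast
    exact pvLastNotY _ _ hnt hlast
  · rw [if_neg h1]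
    by_cases h2 : PySem.Chars.endswith s ['y'] = true
    · have hlast : s.getLast? = some 'y' :=
        (pvSuffixSingleton s 'y').mp ((PySem.Chars.endswith_iff s ['y']).mp h2)
      have hne : s ≠ [] := by rintro rfl; simp at hlast
      have hmem : 'y' ∈ s := List.mem_of_getLast? hlast
      obtain ⟨hsp, hnt⟩ := pvRPartY_spec s hmem
      have ht : (pvRPartY s).2 = [] := by
        match hh : (pvRPartY s).2 with
        | [] => rfl
        | a :: t' =>
          exfalso
          rw [hsp, hh] at hlast
          rw [List.getLast?_append_of_ne_nil _ (by simp : ('y' :: a :: t') ≠ []),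
            List.getLast?_cons_cons] at hlast
          exact hnt (hh ▸ List.mem_of_getLast? hlast)
      rw [if_pos ⟨hne, by rwa [pvGetNegOne _ hne]⟩, if_pos (Or.inr h2)]
      have hs' : s = (pvRPartY s).1 ++ ['y'] := by rw [ht] at hsp; exact hsp
      rw [ht]
      conv_lhs => rw [hs']
      rw [show ((pvRPartY s).1 ++ ['y']).length - 1 = (pvRPartY s).1.length by simp,
        List.take_left]
    · rw [if_neg, if_neg (by tauto)]
      rintro ⟨hne, hlast⟩
      rw [pvGetNegOne _ hne] at hlast
      exact h2 ((PySem.Chars.endswith_iff s ['y']).mpr ((pvSuffixSingleton s 'y').mpr hlast))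

-- unfold B's rule-table folds to chains of replace calls
theorem pvRewrite1 (s : List Char) :
    pvRewrite s pvStage1 =
      PySem.Chars.replace (PySem.Chars.replace (PySem.Chars.replace s
        ['j','u'] ['z','h','u']) ['e','w'] ['i','u']) ['r'] ['l'] := by
  simp [pvRewrite, pvStage1]

theorem pvRewrite2 (s : List Char) :
    pvRewrite s pvStage2 =
      PySem.Chars.replace (PySem.Chars.replace (PySem.Chars.replace (PySem.Chars.replace
        (PySem.Chars.replace (PySem.Chars.replace (PySem.Chars.replace s
        ['i','a'] ['i','y','a']) ['c','e'] ['s','i']) ['c','i'] ['s','i'])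
        ['c','h'] ['q']) ['c'] ['k']) ['c','k'] ['k']) ['p','h'] ['f'] := by
  simp [pvRewrite, pvStage2]

theorem pvRewrite3 (s : List Char) :
    pvRewrite s pvStage3 =
      PySem.Chars.replace (PySem.Chars.replace s ['t','h'] ['x']) ['v'] ['w'] := by
  simp [pvRewrite, pvStage3]

theorem pvCore_eq (s0 : List Char) : pvCoreA s0 = pvCoreB s0 := by
  unfold pvCoreA pvCoreB
  simp only [pvRewrite1, pvRewrite2, pvRewrite3, pvLoop_eq, pvYBlock]

-- ===== VERDICT (by name: the statement is the Claim_ definition above) =====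
theorem phoneme_adjust_spec : Claim_equal_phoneme_adjust := by
  intro eng _
  show phoneme_adjust eng = phoneme_adjust_alt eng
  unfold phoneme_adjust phoneme_adjust_alt
  rw [pvCore_eq]
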